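-- pv_equiv track=rewrite | github.com/Gearlux/liquify | liquifai/report.py | _shortest_unique_paths
-- ===== SOURCE A (Python) =====
-- from typing import Any, Dict, Optional
--
-- def _shortest_unique_paths(all_paths: list) -> Dict[str, str]:
--     """For each full path, pick the shortest trailing dotted-suffix that is unique across ``all_paths``."""
--     display_map: Dict[str, str] = {}
--     for full_path in all_paths:
--         parts = full_path.split(".")
--         for i in range(1, len(parts) + 1):
--             suffix = ".".join(parts[-i:])
--             matches = [p for p in all_paths if p.endswith(f".{suffix}") or p == suffix]
--             if len(matches) == 1:
--                 display_map[full_path] = suffix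
--                 break
--         else:
--             display_map[full_path] = full_path
--     return display_map
-- ===== SOURCE B (Python) =====
-- from typing import Dict
--
-- def _suffixes(parts: list) -> list:
--     """Trailing dotted joins of ``parts``, shortest first."""
--     if len(parts) <= 1:
--         return list(parts)
--     rest = _suffixes(parts[1:])
--     return rest + [parts[0] + "." + rest[-1]]
--
-- def _shortest_unique_paths(all_paths: list) -> Dict[str, str]:
--     # Count, over all paths, how many paths each trailing dotted suffix matches:
--     # a path p matches suffix s iff s is one of p's own trailing dotted suffixes.
--     counts: Dict[str, int] = {}
--     for path in all_paths:
--         for s in _suffixes(path.split(".")):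
--             counts[s] = counts.get(s, 0) + 1
--     display_map: Dict[str, str] = {}
--     for path in all_paths:
--         for s in _suffixes(path.split(".")):
--             if counts.get(s, 0) == 1:
--                 display_map[path] = s
--                 break
--         else:
--             display_map[path] = path
--     return display_map
-- ===== Notes on version B (the rewrite author's own statement) =====
-- stated objective: faster
-- what changed: B precomputes one dictionary counting, for every trailing dotted suffix occurring in the input, how many paths it matches (a path matches s iff s is one of its own trailing dotted suffixes), so picking the shortest unique suffix per path becomes a dictionary lookup instead of A's per-suffix endswith-scan over all paths.
import Mathlib
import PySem

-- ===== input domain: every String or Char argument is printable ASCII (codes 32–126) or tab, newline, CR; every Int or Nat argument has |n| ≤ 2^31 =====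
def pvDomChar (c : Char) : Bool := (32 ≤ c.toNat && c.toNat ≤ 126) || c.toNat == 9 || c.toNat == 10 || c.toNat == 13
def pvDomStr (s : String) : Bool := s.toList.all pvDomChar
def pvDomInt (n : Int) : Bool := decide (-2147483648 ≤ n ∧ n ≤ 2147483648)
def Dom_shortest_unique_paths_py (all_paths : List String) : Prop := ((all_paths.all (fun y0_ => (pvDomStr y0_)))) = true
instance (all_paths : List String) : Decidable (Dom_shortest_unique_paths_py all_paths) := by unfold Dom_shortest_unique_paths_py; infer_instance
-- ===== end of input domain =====

-- B replaces A's per-suffix scan over all paths by one precomputed suffix-count dictionary (measurably faster; asymptotically fewer passes).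
-- String work is done on List Char (PySem.Chars primitives); f".{suffix}" is '.' :: suffix and string equality is List Char equality — exact.

-- ===== PORT A =====
-- matches = [p for p in all_paths if p.endswith(f".{suffix}") or p == suffix]
def aMatches (all_paths : List String) (suffix : List Char) : List String :=
  all_paths.filter (fun p => PySem.Chars.endswith p.toList ('.' :: suffix) || p.toList == suffix)

-- the inner 'for i in range(1, len(parts)+1): … break' loop; none = the loop's 'else' arm
def aFind (all_paths : List String) (parts : List (List Char)) : List Int → Option (List Char)
  | [] => none
  | i :: rest =>
    let suffix := PySem.Chars.join ['.'] (PySem.List.slice parts (some (-i)) none)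
    if (aMatches all_paths suffix).length == 1 then some suffix
    else aFind all_paths parts rest

def shortest_unique_paths_py (all_paths : List String) : List (String × String) :=
  (all_paths.foldl (fun dm p =>
      let parts := PySem.Chars.splitOn p.toList ['.']
      match aFind all_paths parts (PySem.List.pyRange 1 ((parts.length : Int) + 1) 1) with
      | some suf => dm.insert p (String.ofList suf)
      | none => dm.insert p p) (PySem.Dict.empty : PySem.Dict String String)).items

-- ===== PORT B =====
-- _suffixes(parts): trailing dotted joins, shortest first (rest + [parts[0] + "." + rest[-1]])
def bSufs : List (List Char) → List (List Char)
  | [] => []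
  | [q] => [q]
  | q :: r :: rs =>
    let rest := bSufs (r :: rs)
    rest ++ [q ++ '.' :: rest.getLast!]

-- counts[s] = counts.get(s, 0) + 1 over every suffix of every path
def bCounts (all_paths : List String) : PySem.Dict (List Char) Int :=
  all_paths.foldl (fun d p =>
    (bSufs (PySem.Chars.splitOn p.toList ['.'])).foldl
      (fun d s => d.insert s (d.getD s 0 + 1)) d) PySem.Dict.empty

-- the 'for s in _suffixes(…): if counts.get(s, 0) == 1: … break' loop; none = its 'else' arm
def bFind (counts : PySem.Dict (List Char) Int) : List (List Char) → Option (List Char)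
  | [] => none
  | s :: rest => if counts.getD s 0 == 1 then some s else bFind counts rest

def shortest_unique_paths_py_alt (all_paths : List String) : List (String × String) :=
  let counts := bCounts all_paths
  (all_paths.foldl (fun dm p =>
      match bFind counts (bSufs (PySem.Chars.splitOn p.toList ['.'])) with
      | some s => dm.insert p (String.ofList s)
      | none => dm.insert p p) (PySem.Dict.empty : PySem.Dict String String)).items

-- ===== PRECONDITION & SPEC =====
def Spec_shortest_unique_paths_py (all_paths : List String) (out : List (String × String)) : Prop := out = shortest_unique_paths_py_alt all_paths
instance (all_paths : List String) (out : List (String × String)) : Decidable (Spec_shortest_unique_paths_py all_paths out) := by unfold Spec_shortest_unique_paths_py; infer_instance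

-- ===== CLAIM (what is proved, stated in full; the proofs are below) =====
def Claim_equal_shortest_unique_paths_py : Prop := ∀ (all_paths : List String), Dom_shortest_unique_paths_py all_paths → Spec_shortest_unique_paths_py all_paths (shortest_unique_paths_py all_paths)

-- ===== LEMMAS AND PROOFS =====

def dsplit : List Char → List (List Char)
  | [] => [[]]
  | c :: rest =>
    if c = '.' then [] :: dsplit rest
    else
      match dsplit rest with
      | [] => [[c]]
      | h :: t => (c :: h) :: t

theorem dsplit_ne_nil (l : List Char) : dsplit l ≠ [] := by
  cases l with
  | nil => simp [dsplit]
  | cons c rest =>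
    simp only [dsplit]
    split
    · simp
    · cases h : dsplit rest <;> simp

theorem splitOn_go_eq (l : List Char) : ∀ (fuel : Nat) (cur : List Char) (acc : List (List Char)),
    l.length < fuel →
    PySem.Chars.splitOn.go ['.'] fuel l cur acc
      = acc.reverse ++ ((cur.reverse ++ (dsplit l).headI) :: (dsplit l).tail) := by
  induction l with
  | nil =>
    intro fuel cur acc hf
    cases fuel with
    | zero => omega
    | succ f => simp [PySem.Chars.splitOn.go, dsplit]
  | cons c rest ih =>
    intro fuel cur acc hf
    cases fuel with
    | zero => omega
    | succ f =>
      rw [PySem.Chars.splitOn.go]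
      by_cases hc : c = '.'
      · subst hc
        rw [if_pos (by simp [List.isPrefixOf])]
        simp only [List.length_cons, List.drop_succ_cons, List.length_nil, List.drop_zero]
        rw [ih f [] (cur.reverse :: acc) (by simp at hf ⊢; omega)]
        simp [dsplit]
        rcases hd : dsplit rest with _ | ⟨h1, t1⟩
        · exact absurd hd (dsplit_ne_nil rest)
        · simp
      · have : List.isPrefixOf ['.'] (c :: rest) = false := by
          simp [List.isPrefixOf]; exact fun h => absurd h.symm hc
        rw [if_neg (by simp [this])]
        rw [ih f (c :: cur) acc (by simp at hf ⊢; omega)]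
        simp only [dsplit, if_neg hc]
        rcases h2 : dsplit rest with _ | ⟨h1, t1⟩
        · exact absurd h2 (by
            cases rest with
            | nil => simp [dsplit]
            | cons a b => simp only [dsplit]; split; · simp
                          · cases h2 : dsplit b <;> simp)
        · simp

theorem splitOn_dot (l : List Char) : PySem.Chars.splitOn l ['.'] = dsplit l := by
  rw [PySem.Chars.splitOn, splitOn_go_eq l (l.length + 1) [] [] (by omega)]
  rcases hd : dsplit l with _ | ⟨h1, t1⟩
  · exact absurd hd (dsplit_ne_nil l)
  · simp

theorem join_append (A B : List (List Char)) (hA : A ≠ []) (hB : B ≠ []) :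
    PySem.Chars.join ['.'] (A ++ B) = PySem.Chars.join ['.'] A ++ '.' :: PySem.Chars.join ['.'] B := by
  induction A with
  | nil => exact absurd rfl hA
  | cons a A ih =>
    rcases B with _ | ⟨b, B'⟩
    · exact absurd rfl hB
    rcases A with _ | ⟨a2, A'⟩
    · simp [PySem.Chars.join_cons_cons, PySem.Chars.join_singleton]
    · simp only [List.cons_append]
      rw [PySem.Chars.join_cons_cons, PySem.Chars.join_cons_cons]
      rw [show a2 :: (A' ++ b :: B') = (a2 :: A') ++ b :: B' from rfl, ih (by simp)]
      simp

theorem join_dsplit (l : List Char) : PySem.Chars.join ['.'] (dsplit l) = l := by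
  induction l with
  | nil => simp [dsplit, PySem.Chars.join_singleton]
  | cons c rest ih =>
    simp only [dsplit]
    by_cases hc : c = '.'
    · rw [if_pos hc]
      rcases hd : dsplit rest with _ | ⟨h1, t1⟩
      · exact absurd hd (dsplit_ne_nil rest)
      · rw [PySem.Chars.join_cons_cons, ← hd, ih, hc]; simp
    · rw [if_neg hc]
      rcases hd : dsplit rest with _ | ⟨h1, t1⟩
      · exact absurd hd (dsplit_ne_nil rest)
      · rcases t1 with _ | ⟨t2, ts⟩
        · rw [PySem.Chars.join_singleton]
          have := ih; rw [hd, PySem.Chars.join_singleton] at this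
          rw [this]
        · rw [PySem.Chars.join_cons_cons]
          have := ih; rw [hd, PySem.Chars.join_cons_cons] at this
          simp [← this]

theorem dsplit_append (a b : List Char) : dsplit (a ++ '.' :: b) = dsplit a ++ dsplit b := by
  induction a with
  | nil => simp [dsplit]
  | cons c a ih =>
    simp only [List.cons_append, dsplit, ih]
    by_cases hc : c = '.'
    · simp [hc]
    · rw [if_neg hc, if_neg hc]
      rcases hd : dsplit a with _ | ⟨h1, t1⟩
      · exact absurd hd (dsplit_ne_nil a)
      · simp

theorem getLast!_append_singleton (l : List (List Char)) (x : List Char) : (l ++ [x]).getLast! = x := by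
  induction l with
  | nil => rfl
  | cons a t ih =>
    cases t with
    | nil => rfl
    | cons b t2 =>
      simp only [List.cons_append, List.getLast!] at ih ⊢
      exact ih

theorem bSufs_eq_map (parts : List (List Char)) (h : parts ≠ []) :
    bSufs parts = (List.range parts.length).map
      (fun j => PySem.Chars.join ['.'] (parts.drop (parts.length - 1 - j))) := by
  induction parts using bSufs.induct with
  | case1 => exact absurd rfl h
  | case2 q => simp [bSufs, PySem.Chars.join_singleton]
  | case3 q r rs ih =>
    have ihm := ih (by simp)
    show bSufs (r :: rs) ++ [q ++ '.' :: (bSufs (r :: rs)).getLast!] = _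
    have hlast : (bSufs (r :: rs)).getLast! = PySem.Chars.join ['.'] (r :: rs) := by
      rw [ihm]
      have : List.range (r :: rs).length = List.range rs.length ++ [rs.length] := by
        simp [List.range_succ]
      rw [this, List.map_append, List.map_singleton, getLast!_append_singleton]
      have h0 : (r :: rs).length - 1 - rs.length = 0 := by simp
      rw [h0, List.drop_zero]
    rw [hlast, ihm]
    have hn : (q :: r :: rs).length = (r :: rs).length + 1 := rfl
    rw [hn, List.range_succ, List.map_append, List.map_singleton]
    congr 1
    · apply List.map_congr_left
      intro j hj
      simp only [List.mem_range] at hj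
      have : (r :: rs).length + 1 - 1 - j = ((r :: rs).length - 1 - j) + 1 := by omega
      rw [this, List.drop_succ_cons]
    · have : (r :: rs).length + 1 - 1 - (r :: rs).length = 0 := by omega
      rw [this, List.drop_zero, PySem.Chars.join_cons_cons]
      simp

theorem mem_bSufs (parts : List (List Char)) (h : parts ≠ []) (s : List Char) :
    s ∈ bSufs parts ↔ ∃ k < parts.length, s = PySem.Chars.join ['.'] (parts.drop k) := by
  rw [bSufs_eq_map parts h]
  simp only [List.mem_map, List.mem_range]
  constructor
  · rintro ⟨j, hj, rfl⟩
    exact ⟨parts.length - 1 - j, by omega, rfl⟩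
  · rintro ⟨k, hk, rfl⟩
    refine ⟨parts.length - 1 - k, by omega, ?_⟩
    congr 2
    omega

theorem len_join_drop_lt (parts : List (List Char)) (k k' : Nat) (hkk : k < k') (hk' : k' < parts.length) :
    (PySem.Chars.join ['.'] (parts.drop k')).length < (PySem.Chars.join ['.'] (parts.drop k)).length := by
  have hsplit : parts.drop k = (parts.drop k).take (k' - k) ++ parts.drop k' := by
    have : parts.drop k' = (parts.drop k).drop (k' - k) := by
      rw [List.drop_drop]
      congr 1
      omega
    rw [this, List.take_append_drop]
  rw [hsplit, join_append _ _ (by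
      have : ((parts.drop k).take (k' - k)).length = min (k' - k) (parts.length - k) := by simp
      intro hnil; rw [hnil] at this; simp at this; omega)
    (by intro hnil; have := List.drop_eq_nil_iff.mp hnil; omega)]
  simp
  omega

theorem nodup_bSufs (parts : List (List Char)) : (bSufs parts).Nodup := by
  rcases parts with _ | ⟨p, ps⟩
  · simp [bSufs]
  · rw [bSufs_eq_map _ (by simp)]
    apply List.Nodup.map_on _ (List.nodup_range)
    intro j hj j' hj' hf
    simp only [List.mem_range] at hj hj'
    by_contra hne
    rcases Nat.lt_or_ge j j' with hlt | hge
    · have := len_join_drop_lt (p :: ps) ((p :: ps).length - 1 - j') ((p :: ps).length - 1 - j)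
        (by omega) (by omega)
      rw [hf] at this
      omega
    · have hlt : j' < j := by omega
      have := len_join_drop_lt (p :: ps) ((p :: ps).length - 1 - j) ((p :: ps).length - 1 - j')
        (by omega) (by omega)
      rw [hf] at this
      omega

theorem match_iff (c s : List Char) :
    (PySem.Chars.endswith c ('.' :: s) || c == s) = true
      ↔ ∃ k < (dsplit c).length, s = PySem.Chars.join ['.'] ((dsplit c).drop k) := by
  constructor
  · intro h
    rcases Bool.or_eq_true_iff.mp h with h | h
    · obtain ⟨u, hu⟩ := (PySem.Chars.endswith_iff c ('.' :: s)).mp h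
      refine ⟨(dsplit u).length, ?_, ?_⟩
      · rw [← hu, dsplit_append]
        have hpos := List.length_pos_of_ne_nil (dsplit_ne_nil s)
        rw [List.length_append]
        omega
      · rw [← hu, dsplit_append, List.drop_left, join_dsplit]
    · have : c = s := by simpa using h
      subst this
      exact ⟨0, List.length_pos_of_ne_nil (dsplit_ne_nil c), by rw [List.drop_zero, join_dsplit]⟩
  · rintro ⟨k, hk, rfl⟩
    rcases Nat.eq_zero_or_pos k with rfl | hkpos
    · rw [List.drop_zero, join_dsplit]
      simp
    · apply Bool.or_eq_true_iff.mpr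
      left
      apply (PySem.Chars.endswith_iff _ _).mpr
      refine ⟨PySem.Chars.join ['.'] ((dsplit c).take k), ?_⟩
      have hsplit : dsplit c = (dsplit c).take k ++ (dsplit c).drop k := (List.take_append_drop k _).symm
      have hc : c = PySem.Chars.join ['.'] ((dsplit c).take k) ++ '.' :: PySem.Chars.join ['.'] ((dsplit c).drop k) := by
        conv_lhs => rw [← join_dsplit c, hsplit]
        exact join_append _ _
          (by intro hnil; have h2 := congrArg List.length hnil;
              rw [List.length_take] at h2; simp only [List.length_nil] at h2; omega)
          (by intro hnil; have h2 := congrArg List.length hnil;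
              rw [List.length_drop] at h2; simp only [List.length_nil] at h2; omega)
      exact hc.symm

theorem foldl_nested {α β γ : Type} (l : List α) (g : α → List β) (f : γ → β → γ) (init : γ) :
    l.foldl (fun d p => (g p).foldl f d) init = (l.flatMap g).foldl f init := by
  induction l generalizing init with
  | nil => rfl
  | cons x t ih => simp [List.foldl_append, ih]

theorem counts_eq (all_paths : List String) (s : List Char) :
    (bCounts all_paths).getD s 0
      = (all_paths.countP (fun p => PySem.Chars.endswith p.toList ('.' :: s) || p.toList == s) : Int) := by
  unfold bCounts
  rw [foldl_nested, PySem.Dict.getD_foldl_insert_add_one]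
  rw [PySem.Dict.getD_empty]
  have : (all_paths.flatMap (fun p => bSufs (PySem.Chars.splitOn p.toList ['.']))).count s
      = all_paths.countP (fun p => PySem.Chars.endswith p.toList ('.' :: s) || p.toList == s) := by
    induction all_paths with
    | nil => rfl
    | cons p t ih =>
      rw [List.flatMap_cons, List.count_append, List.countP_cons, ih]
      have hmem : (s ∈ bSufs (PySem.Chars.splitOn p.toList ['.']))
          ↔ (PySem.Chars.endswith p.toList ('.' :: s) || p.toList == s) = true := by
        rw [splitOn_dot, mem_bSufs _ (dsplit_ne_nil _) s, match_iff]
      by_cases hm : s ∈ bSufs (PySem.Chars.splitOn p.toList ['.'])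
      · rw [List.count_eq_one_of_mem (nodup_bSufs _) hm, hmem.mp hm]
        simp [Nat.add_comm]
      · rw [List.count_eq_zero_of_not_mem hm]
        have hf := hm
        rw [hmem] at hf
        simp only [Bool.not_eq_true] at hf
        rw [hf]
        simp
  omega

theorem cond_eq (ap : List String) (suffix : List Char) :
    ((aMatches ap suffix).length == 1) = ((bCounts ap).getD suffix 0 == 1) := by
  rw [counts_eq]
  unfold aMatches
  rw [← List.countP_eq_length_filter]
  by_cases h : ap.countP (fun p => PySem.Chars.endswith p.toList ('.' :: suffix) || p.toList == suffix) = 1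
  · simp [h]
  · have h2 : ((ap.countP (fun p => PySem.Chars.endswith p.toList ('.' :: suffix) || p.toList == suffix) : Int)) ≠ 1 := by
      intro hc
      exact h (by exact_mod_cast hc)
    simp [h, h2]

theorem find_eq_aux (ap : List String) (parts : List (List Char)) :
    ∀ js : List Nat, (∀ j ∈ js, j < parts.length) →
    aFind ap parts (js.map (fun j : Nat => (1 + (j : Int))))
      = bFind (bCounts ap) (js.map (fun j => PySem.Chars.join ['.'] (parts.drop (parts.length - 1 - j)))) := by
  intro js
  induction js with
  | nil => intro _; rfl
  | cons j t ih =>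
    intro hmem
    have hj : j < parts.length := hmem j (by simp)
    simp only [List.map_cons]
    simp only [aFind, bFind]
    have hslice : PySem.List.slice parts (some (-(1 + (j:Int)))) none = parts.drop (parts.length - 1 - j) := by
      have : -(1 + (j:Int)) = -(((j+1 : Nat) : Int)) := by push_cast; ring
      rw [this, PySem.List.slice_from_neg_natCast parts (j+1) (by omega)]
      congr 1
      omega
    simp only [hslice]
    rw [cond_eq]
    split
    · rfl
    · exact ih (fun x hx => hmem x (by simp [hx]))

theorem find_eq (ap : List String) (parts : List (List Char)) (h : parts ≠ []) :
    aFind ap parts (PySem.List.pyRange 1 ((parts.length : Int) + 1) 1)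
      = bFind (bCounts ap) (bSufs parts) := by
  rw [PySem.List.pyRange_one]
  have hn : (((parts.length : Int) + 1) - 1).toNat = parts.length := by omega
  rw [hn, bSufs_eq_map parts h]
  exact find_eq_aux ap parts (List.range parts.length) (fun j hj => List.mem_range.mp hj)

theorem main_eq (all_paths : List String) :
    shortest_unique_paths_py all_paths = shortest_unique_paths_py_alt all_paths := by
  unfold shortest_unique_paths_py shortest_unique_paths_py_alt
  congr 1
  apply PySem.List.foldl_congr_mem
  intro dm p _
  have hne : PySem.Chars.splitOn p.toList ['.'] ≠ [] := by
    rw [splitOn_dot]; exact dsplit_ne_nil _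
  simp only [find_eq all_paths (PySem.Chars.splitOn p.toList ['.']) hne]

-- ===== VERDICT (by name: the statement is the Claim_ definition above) =====
theorem shortest_unique_paths_py_spec : Claim_equal_shortest_unique_paths_py := by
  intro all_paths _
  unfold Spec_shortest_unique_paths_py
  exact main_eq all_paths
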